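-- pv_equiv track=rewrite | github.com/cimatosa/progression | progression/terminal.py | _close_kind
-- ===== SOURCE A (Python) =====
-- def _close_kind(stack, which_kind):
--     stack_tmp = []
--     s = ""
--
--     # close everything until which_kind is found
--     while True:
--         kind, start, end = stack.pop()
--         if kind != which_kind:
--             s += end
--             stack_tmp.append((kind, start, end))
--         else:
--             break
--
--     # close which_kind
--     s = end
--
--     # start everything that was closed before which_kind
--     for kind, start, end in stack_tmp:
--         s += start
--         stack.append((kind, start, end))
--
--     return s
-- ===== SOURCE B (Python) =====
-- def _close_kind(stack, which_kind):
--     kinds = [kind for kind, _, _ in stack]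
--     idx = len(kinds) - 1 - kinds[::-1].index(which_kind)
--     above = stack[idx + 1:]
--     result = stack[idx][2] + "".join(start for _, start, _ in reversed(above))
--     stack[idx:] = reversed(above)
--     return result
-- ===== Notes on version B (the rewrite author's own statement) =====
-- stated objective: alternative
-- what changed: Replaces the destructive pop-until-match loop with a single top-down scan for the matched index plus slice arithmetic: the result is built from stack[idx][2] and the joined starts of the reversed slice above idx, and the stack is rewritten with one slice assignment instead of element-by-element pops and appends.
import Mathlib
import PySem

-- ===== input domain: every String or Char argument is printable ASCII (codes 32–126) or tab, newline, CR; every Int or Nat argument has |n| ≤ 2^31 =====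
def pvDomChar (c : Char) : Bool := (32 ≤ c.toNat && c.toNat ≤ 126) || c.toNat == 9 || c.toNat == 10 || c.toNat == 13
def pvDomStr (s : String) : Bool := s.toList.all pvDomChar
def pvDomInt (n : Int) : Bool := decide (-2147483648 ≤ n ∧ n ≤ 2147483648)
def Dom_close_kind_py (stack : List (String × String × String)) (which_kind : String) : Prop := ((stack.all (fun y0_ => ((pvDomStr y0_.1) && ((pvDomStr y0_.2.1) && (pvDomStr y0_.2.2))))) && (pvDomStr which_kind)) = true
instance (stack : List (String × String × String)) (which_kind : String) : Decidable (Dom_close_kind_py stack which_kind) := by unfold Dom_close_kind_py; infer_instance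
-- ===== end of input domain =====

-- B replaces A's destructive pop-until-match loop by a scan for the matched index plus slice
-- arithmetic (objective: alternative). Both Pythons also mutate `stack` in place identically on
-- Pre_; the equivalence proved here is about the RETURN value only.

-- ===== PORT A =====
-- A's while-True loop popping from the end of `stack`: iterates stack.reverse, carrying the
-- (discarded) accumulator s and stack_tmp; returns none on pop from an empty list (IndexError),
-- and (stack_tmp, end-of-match) at break.
def closeALoop (which_kind : String) :
    List (String × String × String) → List (String × String × String) → String →
    Option (List (String × String × String) × String)
  | [], _, _ => none
  | (kind, start, e) :: rest, tmp, s =>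
    if kind ≠ which_kind then
      closeALoop which_kind rest (tmp ++ [(kind, start, e)]) (s ++ e)
    else
      some (tmp, e)

def close_kind_py (stack : List (String × String × String)) (which_kind : String) : String :=
  match closeALoop which_kind stack.reverse [] "" with
  | none => ""   -- IndexError: excluded by Pre_
  | some (tmp, e) =>
    -- s = end; then for (kind, start, end) in stack_tmp: s += start
    tmp.foldl (fun s x => s ++ x.2.1) e

-- ===== PORT B =====
def close_kind_py_alt (stack : List (String × String × String)) (which_kind : String) : String :=
  match PySem.List.index? ((stack.map (·.1)).reverse) which_kind with
  | none => ""   -- ValueError: excluded by Pre_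
  | some j =>
    -- idx = len(kinds) - 1 - j; above = stack[idx+1:]
    (stack.getD ((stack.map (·.1)).length - 1 - j) ("", "", "")).2.2 ++
      String.join ((stack.drop ((stack.map (·.1)).length - 1 - j + 1)).reverse.map (·.2.1))

-- ===== PRECONDITION & SPEC =====
-- A raises IndexError (and B ValueError) when which_kind occurs nowhere in the stack's kinds.
def Pre_close_kind_py (stack : List (String × String × String)) (which_kind : String) : Prop :=
  which_kind ∈ stack.map (·.1)
instance (stack : List (String × String × String)) (which_kind : String) : Decidable (Pre_close_kind_py stack which_kind) := by unfold Pre_close_kind_py; infer_instance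

def pvWitness_close_kind_py : (List (String × String × String)) × String :=
  ([("b", "<b>", "</b>"), ("i", "<i>", "</i>")], "b")

def Spec_close_kind_py (stack : List (String × String × String)) (which_kind : String) (out : String) : Prop := out = close_kind_py_alt stack which_kind
instance (stack : List (String × String × String)) (which_kind : String) (out : String) : Decidable (Spec_close_kind_py stack which_kind out) := by unfold Spec_close_kind_py; infer_instance

-- ===== CLAIM (what is proved, stated in full; the proofs are below) =====
def Claim_equal_close_kind_py : Prop := ∀ (stack : List (String × String × String)) (which_kind : String), Dom_close_kind_py stack which_kind → Pre_close_kind_py stack which_kind → Spec_close_kind_py stack which_kind (close_kind_py stack which_kind)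

-- ===== LEMMAS AND PROOFS =====

-- A's loop = split at the first match: takeWhile/dropWhile on the reversed stack.
theorem closeALoop_char (wk : String) :
    ∀ (l tmp : List (String × String × String)) (s : String),
      closeALoop wk l tmp s =
        match l.dropWhile (fun x => x.1 != wk) with
        | [] => none
        | m :: _ => some (tmp ++ l.takeWhile (fun x => x.1 != wk), m.2.2) := by
  intro l
  induction l with
  | nil => intro tmp s; simp [closeALoop]
  | cons x rest ih =>
    intro tmp s
    obtain ⟨k, st, e⟩ := x
    by_cases h : k = wk
    · simp [closeALoop, h]
    · simp [closeALoop, h, ih]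

-- foldl-append over starts = prefix ++ join of the mapped starts
theorem foldl_append_join :
    ∀ (t : List (String × String × String)) (s0 : String),
      t.foldl (fun s x => s ++ x.2.1) s0 = s0 ++ String.join (t.map (·.2.1)) := by
  intro t
  induction t with
  | nil => intro s0; simp [String.join]
  | cons x rest ih =>
    intro s0
    have hjoin : String.join (x.2.1 :: rest.map (·.2.1)) = x.2.1 ++ String.join (rest.map (·.2.1)) := by
      simp [String.join]
      rw [show x.2.1 = x.2.1 ++ "" by simp]
      generalize x.2.1 ++ "" = a
      induction rest.map (·.2.1) generalizing a with
      | nil => simp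
      | cons y ys ihy =>
        rw [List.foldl_cons, List.foldl_cons, ihy (a ++ y), ihy ("" ++ y)]
        simp [String.append_assoc]
    simp only [List.foldl_cons, List.map_cons, hjoin, ih, String.append_assoc]

-- index? on the mapped kinds finds exactly the length of the non-matching prefix
theorem index?_takeWhile (wk : String) :
    ∀ (l : List (String × String × String)), wk ∈ l.map (·.1) →
      PySem.List.index? (l.map (·.1)) wk = some ((l.takeWhile (fun x => x.1 != wk)).length) := by
  intro l
  induction l with
  | nil => simp
  | cons x rest ih =>
    intro hmem
    by_cases h : x.1 = wk
    · rw [List.map_cons, h, PySem.List.index?_cons_self]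
      simp [h]
    · have hmem' : wk ∈ rest.map (·.1) := by
        simp only [List.map_cons, List.mem_cons] at hmem
        rcases hmem with h1 | h1
        · exact absurd h1.symm h
        · exact h1
      rw [List.map_cons, PySem.List.index?_cons_of_ne _ h, ih hmem']
      simp [h]

theorem close_kind_eq (stack : List (String × String × String)) (wk : String)
    (hpre : wk ∈ stack.map (·.1)) :
    close_kind_py stack wk = close_kind_py_alt stack wk := by
  classical
  set l := stack.reverse with hl
  set q : (String × String × String) → Bool := (fun x => x.1 != wk) with hq
  -- the dropWhile part of l is nonempty
  have hmeml : wk ∈ l.map (·.1) := by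
    simpa [hl, List.map_reverse] using hpre
  have hne : l.dropWhile q ≠ [] := by
    intro hnil
    rw [List.dropWhile_eq_nil_iff] at hnil
    obtain ⟨x, hx, hx1⟩ := List.mem_map.mp hmeml
    have := hnil x hx
    simp [hq, hx1] at this
  obtain ⟨m, rest, hd⟩ : ∃ m rest, l.dropWhile q = m :: rest := by
    cases hdw : l.dropWhile q with
    | nil => exact absurd hdw hne
    | cons a b => exact ⟨a, b, rfl⟩
  set t := l.takeWhile q with ht
  have hsplit : l = t ++ m :: rest := by
    rw [ht, ← hd, List.takeWhile_append_dropWhile]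
  -- A's value
  have hA : close_kind_py stack wk = m.2.2 ++ String.join (t.map (·.2.1)) := by
    unfold close_kind_py
    rw [closeALoop_char wk stack.reverse [] "", ← hl, ← hq, hd]
    simp [foldl_append_join, ht]
  -- stack in split form
  have hstack : stack = rest.reverse ++ m :: t.reverse := by
    have : stack = l.reverse := by simp [hl]
    rw [this, hsplit]; simp
  have hlen : stack.length = rest.length + 1 + t.length := by
    rw [hstack]; simp; omega
  -- B's value
  have hB : close_kind_py_alt stack wk = m.2.2 ++ String.join (t.map (·.2.1)) := by
    unfold close_kind_py_alt
    have hkinds : (stack.map (·.1)).reverse = l.map (·.1) := by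
      simp [hl, List.map_reverse]
    rw [hkinds, index?_takeWhile wk l hmeml, ← ht]
    simp only [List.length_map]
    have hidx : stack.length - 1 - t.length = rest.length := by omega
    rw [hidx]
    have hdrop : stack.drop rest.length = m :: t.reverse := by
      rw [hstack]
      have : rest.length = rest.reverse.length := by simp
      rw [this, List.drop_left]
    have hdrop1 : stack.drop (rest.length + 1) = t.reverse := by
      have : stack.drop (rest.length + 1) = (stack.drop rest.length).drop 1 := by
        rw [List.drop_drop]
      rw [this, hdrop]; simp
    have hgetD : stack.getD rest.length ("", "", "") = m := by
      have h0 : stack[rest.length]? = some m := by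
        rw [hstack, List.getElem?_append_right (by simp)]
        simp
      rw [List.getD_eq_getElem?_getD, h0]
      rfl
    rw [hdrop1, hgetD]
    simp
  rw [hA, hB]

-- ===== VERDICT (by name: the statement is the Claim_ definition above) =====
theorem close_kind_py_spec : Claim_equal_close_kind_py := by
  intro stack wk _hdom hpre
  unfold Spec_close_kind_py
  exact close_kind_eq stack wk hpre
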